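-- pv_equiv track=rewrite | github.com/Sehktel/LogicSelector | ls_5.py | find_mask
-- ===== SOURCE A (Python) =====
-- def find_mask(sequence, mask):
--     length = len(sequence[0])
--     common_mask = ""
--     for i in range(length):
--         if all(s[i] == sequence[0][i] for s in sequence):
--             common_mask += sequence[0][i]
--         else:
--             common_mask += "x"
--     return common_mask
-- ===== SOURCE B (Python) =====
-- def find_mask(sequence, mask):
--     length = len(sequence[0])
--     trunc = [s[:length] for s in sequence]
--
--     def merge(a, b):
--         return "".join(x if x == y else "x" for x, y in zip(a, b))
--
--     def rec(lo, hi):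
--         if hi - lo <= 1:
--             return trunc[lo]
--         mid = (lo + hi) // 2
--         return merge(rec(lo, mid), rec(mid, hi))
--
--     return rec(0, len(trunc))
-- ===== Notes on version B (the rewrite author's own statement) =====
-- stated objective: alternative
-- what changed: B computes the mask by divide-and-conquer: it truncates every string to len(sequence[0]) and recursively merges masks of halves with a binary merge (keep a char iff the two masks agree, else 'x'), exploiting that 'x' is absorbing; A does an independent all() scan over the strings for each position.
-- outside the precondition, e.g. on find_mask(['ab', 'cd', ''], ''): A returns 'xx', B returns ''; on find_mask([], ''): A raises IndexError, B raises IndexError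
import Mathlib
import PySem

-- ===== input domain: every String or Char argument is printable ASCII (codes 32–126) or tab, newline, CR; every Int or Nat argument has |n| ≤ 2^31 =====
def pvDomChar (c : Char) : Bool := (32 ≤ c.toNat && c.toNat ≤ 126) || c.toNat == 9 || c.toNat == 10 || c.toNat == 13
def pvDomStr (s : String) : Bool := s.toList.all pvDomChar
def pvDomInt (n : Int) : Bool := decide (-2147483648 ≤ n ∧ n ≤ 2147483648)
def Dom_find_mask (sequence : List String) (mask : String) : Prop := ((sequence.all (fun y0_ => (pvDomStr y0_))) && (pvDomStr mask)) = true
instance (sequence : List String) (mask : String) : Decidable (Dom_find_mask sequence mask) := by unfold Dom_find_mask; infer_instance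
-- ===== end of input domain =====

-- B replaces A's per-position all() scan by divide-and-conquer: strings are truncated to
-- len(sequence[0]) and masks of halves are merged pairwise (keep a char iff the two masks
-- agree there, else 'x'); correct because 'x' is absorbing under this merge.

-- ===== PORT A =====
-- Python raises IndexError on [] and on s[i] for too-short s; those inputs are outside Pre_,
-- there the `[] => ""` branch / `getD i ' '` stand in (exact on Pre_, where every index is in range).
def find_mask (sequence : List String) (mask : String) : String :=
  match sequence with
  | [] => ""  -- sequence[0] raises IndexError in Python (excluded by Pre_)
  | ref :: _ =>
    let refC := ref.toList
    String.mk ((List.range refC.length).foldl (fun acc i =>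
      acc ++ [if sequence.all (fun s => s.toList.getD i ' ' == refC.getD i ' ')
              then refC.getD i ' ' else 'x']) [])

-- ===== PORT B =====
-- merge(a, b) of Source B: ''.join(x if x == y else 'x' for x, y in zip(a, b))
def mergeB (a b : List Char) : List Char :=
  (a.zip b).map (fun p => if p.1 = p.2 then p.1 else 'x')

-- rec(lo, hi) of Source B (the `hi ≤ lo + 1` guard is Python's `hi - lo <= 1` base case; the
-- fuel argument only makes the recursion structural — with fuel ≥ hi - lo it is never consumed)
def recB (trunc : List (List Char)) : Nat → Nat → Nat → List Char
  | 0, lo, _ => trunc.getD lo []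
  | fuel + 1, lo, hi =>
    if hi ≤ lo + 1 then trunc.getD lo []
    else mergeB (recB trunc fuel lo ((lo + hi) / 2)) (recB trunc fuel ((lo + hi) / 2) hi)

def find_mask_alt (sequence : List String) (mask : String) : String :=
  match sequence with
  | [] => ""  -- sequence[0] raises IndexError in Python (excluded by Pre_)
  | ref :: _ =>
    let length := ref.toList.length
    let trunc := sequence.map (fun s => PySem.List.slice s.toList none (some (length : Int)))
    String.mk (recB trunc trunc.length 0 trunc.length)

-- ===== PRECONDITION & SPEC =====
-- Pre_ excludes the empty sequence and sequences containing a member shorter than sequence[0]: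
-- there A raises IndexError, or returns only by accident of all()'s left-to-right short-circuit
-- reaching a mismatch before the short string, while B's zip-merge silently truncates.
def Pre_find_mask (sequence : List String) (mask : String) : Prop :=
  sequence ≠ [] ∧ ∀ s ∈ sequence, (sequence.headD "").length ≤ s.length
instance (sequence : List String) (mask : String) : Decidable (Pre_find_mask sequence mask) := by
  unfold Pre_find_mask; infer_instance
def pvWitness_find_mask : List String × String := (["abc", "abd", "xbc"], "")

def Spec_find_mask (sequence : List String) (mask : String) (out : String) : Prop := out = find_mask_alt sequence mask
instance (sequence : List String) (mask : String) (out : String) : Decidable (Spec_find_mask sequence mask out) := by unfold Spec_find_mask; infer_instance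

-- ===== CLAIM (what is proved, stated in full; the proofs are below) =====
def Claim_equal_find_mask : Prop := ∀ (sequence : List String) (mask : String), Dom_find_mask sequence mask → Pre_find_mask sequence mask → Spec_find_mask sequence mask (find_mask sequence mask)

-- ===== LEMMAS AND PROOFS =====

-- A's string-accumulator loop builds the map over its index range.
theorem foldl_snoc_map {α β : Type} (f : α → β) :
    ∀ (l : List α) (acc : List β), l.foldl (fun a i => a ++ [f i]) acc = acc ++ l.map f := by
  intro l
  induction l with
  | nil => simp
  | cons x xs ih => intro acc; simp [List.foldl_cons, ih]

theorem mergeB_length (a b : List Char) : (mergeB a b).length = min a.length b.length := by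
  simp [mergeB]

theorem mergeB_getD (a b : List Char) (j : Nat) (ha : j < a.length) (hb : j < b.length) :
    (mergeB a b).getD j ' ' = if a.getD j ' ' = b.getD j ' ' then a.getD j ' ' else 'x' := by
  have hj : j < (mergeB a b).length := by rw [mergeB_length]; omega
  rw [List.getD_eq_getElem?_getD, List.getElem?_eq_getElem hj, Option.getD_some,
      List.getD_eq_getElem?_getD, List.getElem?_eq_getElem ha, Option.getD_some,
      List.getD_eq_getElem?_getD, List.getElem?_eq_getElem hb, Option.getD_some]
  simp [mergeB]

-- the recursion preserves the common length L
theorem recB_length (trunc : List (List Char)) (L : Nat)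
    (hL : ∀ c ∈ trunc, c.length = L) :
    ∀ (fuel lo hi : Nat), lo < hi → hi - lo ≤ fuel → hi ≤ trunc.length →
      (recB trunc fuel lo hi).length = L := by
  intro fuel
  induction fuel with
  | zero => intro lo hi h1 h2 _; omega
  | succ fuel ih =>
    intro lo hi h1 h2 h3
    by_cases h : hi ≤ lo + 1
    · rw [recB, if_pos h, List.getD_eq_getElem _ _ (by omega)]
      exact hL _ (List.getElem_mem _)
    · rw [recB, if_neg h, mergeB_length,
          ih lo ((lo + hi) / 2) (by omega) (by omega) (by omega),
          ih ((lo + hi) / 2) hi (by omega) (by omega) h3]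
      omega

-- the heart of B: position j of the mask of trunc[lo:hi] is trunc[lo][j] iff all rows in the
-- range agree with trunc[lo] at j, else 'x'
theorem recB_getD (trunc : List (List Char)) (L : Nat)
    (hL : ∀ c ∈ trunc, c.length = L) :
    ∀ (fuel lo hi : Nat), lo < hi → hi - lo ≤ fuel → hi ≤ trunc.length → ∀ j, j < L →
    (recB trunc fuel lo hi).getD j ' ' =
      if ∀ k < hi, lo ≤ k → (trunc.getD k []).getD j ' ' = (trunc.getD lo []).getD j ' '
      then (trunc.getD lo []).getD j ' ' else 'x' := by
  intro fuel
  induction fuel with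
  | zero => intro lo hi h1 hf _ _ _; omega
  | succ fuel ih =>
    intro lo hi h1 hf h2 j hj
    by_cases h : hi ≤ lo + 1
    · rw [recB, if_pos h, if_pos]
      intro k hk hk'
      have : k = lo := by omega
      rw [this]
    · have hmid1 : lo < (lo + hi) / 2 := by omega
      have hmid2 : (lo + hi) / 2 < hi := by omega
      have hlen1 : (recB trunc fuel lo ((lo + hi) / 2)).length = L :=
        recB_length trunc L hL fuel lo _ hmid1 (by omega) (by omega)
      have hlen2 : (recB trunc fuel ((lo + hi) / 2) hi).length = L :=
        recB_length trunc L hL fuel _ hi hmid2 (by omega) h2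
      rw [recB, if_neg h, mergeB_getD _ _ j (by omega) (by omega),
          ih lo ((lo + hi) / 2) hmid1 (by omega) (by omega) j hj,
          ih ((lo + hi) / 2) hi hmid2 (by omega) h2 j hj]
      set mid := (lo + hi) / 2 with hm
      set c1 := (trunc.getD lo []).getD j ' ' with hc1
      set c2 := (trunc.getD mid []).getD j ' ' with hc2
      by_cases hP1 : ∀ k < mid, lo ≤ k → (trunc.getD k []).getD j ' ' = c1
      · by_cases hP2 : ∀ k < hi, mid ≤ k → (trunc.getD k []).getD j ' ' = c2
        · by_cases hc : c1 = c2
          · rw [if_pos hP1, if_pos hP2, if_pos (by rw [hc]), if_pos]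
            intro k hk hk'
            by_cases hkm : k < mid
            · exact hP1 k hkm hk'
            · rw [hP2 k hk (by omega), hc]
          · rw [if_pos hP1, if_pos hP2, if_neg hc, if_neg]
            intro hall
            exact hc (by rw [← hall mid hmid2 (by omega)])
        · have hPfail : ¬ ∀ k < hi, lo ≤ k → (trunc.getD k []).getD j ' ' = c1 := by
            intro hall
            apply hP2
            intro k hk hk'
            rw [hall k hk (by omega), ← hall mid hmid2 (by omega)]
          rw [if_pos hP1, if_neg hP2, if_neg hPfail]
          by_cases hx : c1 = ('x' : Char)
          · rw [if_pos hx]; exact hx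
          · rw [if_neg hx]
      · rw [if_neg hP1]
        have hPfail : ¬ ∀ k < hi, lo ≤ k → (trunc.getD k []).getD j ' ' = c1 := by
          intro hall
          exact hP1 (fun k hk hk' => hall k (by omega) hk')
        rw [if_neg hPfail]
        by_cases hP2 : ∀ k < hi, mid ≤ k → (trunc.getD k []).getD j ' ' = c2
        · rw [if_pos hP2]
          by_cases hx : ('x' : Char) = c2
          · rw [if_pos hx]
          · rw [if_neg hx]
        · rw [if_neg hP2, if_pos rfl]

-- getD through a take: positions below the cut are unchanged
theorem getD_take (l : List Char) (L j : Nat) (hj : j < L) :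
    (l.take L).getD j ' ' = l.getD j ' ' := by
  rw [List.getD_eq_getElem?_getD, List.getD_eq_getElem?_getD, List.getElem?_take,
      if_pos hj]

theorem find_mask_eq_alt (sequence : List String) (mask : String)
    (hpre : Pre_find_mask sequence mask) :
    find_mask sequence mask = find_mask_alt sequence mask := by
  obtain ⟨hne, hlen⟩ := hpre
  cases sequence with
  | nil => exact absurd rfl hne
  | cons ref rest =>
    unfold find_mask find_mask_alt
    simp only
    congr 1
    rw [foldl_snoc_map, List.nil_append]
    set refC := ref.toList with hrefC
    set L := refC.length with hLdef
    set seq := ref :: rest with hseq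
    have hslice : ∀ s : String, PySem.List.slice s.toList none (some (L : Int)) = s.toList.take L := by
      intro s; exact PySem.List.slice_to_natCast s.toList L
    set trunc := seq.map (fun s => PySem.List.slice s.toList none (some (L : Int))) with htr
    have htr' : trunc = seq.map (fun s => s.toList.take L) := by
      rw [htr]; exact List.map_congr_left (fun s _ => hslice s)
    have hmemlen : ∀ s ∈ seq, L ≤ s.toList.length := by
      intro s hs
      have := hlen s hs
      simpa [hseq, hrefC] using this
    have hLall : ∀ c ∈ trunc, c.length = L := by
      rw [htr']
      intro c hc
      obtain ⟨s, hs, rfl⟩ := List.mem_map.mp hc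
      rw [List.length_take]
      exact Nat.min_eq_left (hmemlen s hs)
    have htlen : trunc.length = seq.length := by rw [htr, List.length_map]
    have hpos : 0 < trunc.length := by rw [htlen, hseq]; simp
    -- trunc.getD k relates to seq.getD k for k in range
    have hgk : ∀ k, k < seq.length → ∀ j, j < L →
        (trunc.getD k []).getD j ' ' = (seq.getD k "").toList.getD j ' ' := by
      intro k hk j hj
      have h1 : trunc.getD k [] = ((seq.getD k "").toList.take L) := by
        rw [htr', List.getD_eq_getElem?_getD, List.getElem?_map,
            List.getElem?_eq_getElem hk]
        simp [List.getD_eq_getElem?_getD, List.getElem?_eq_getElem hk]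
      rw [h1, getD_take _ _ _ hj]
    apply List.ext_getElem
    · rw [List.length_map, List.length_range,
        recB_length trunc L hLall trunc.length 0 trunc.length hpos (by omega) le_rfl]
    · intro j h1 h2
      have hj : j < L := by simpa using h1
      have hB := recB_getD trunc L hLall trunc.length 0 trunc.length hpos (by omega) le_rfl j hj
      rw [List.getD_eq_getElem?_getD, List.getElem?_eq_getElem h2, Option.getD_some] at hB
      rw [List.getElem_map, List.getElem_range, hB]
      have hg0 : (trunc.getD 0 []).getD j ' ' = refC.getD j ' ' := by
        rw [hgk 0 (by rw [hseq]; simp) j hj, hseq]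
        rfl
      have hiff : (∀ k < trunc.length, 0 ≤ k →
          (trunc.getD k []).getD j ' ' = (trunc.getD 0 []).getD j ' ')
          ↔ (seq.all (fun s => s.toList.getD j ' ' == refC.getD j ' ') = true) := by
        rw [List.all_eq_true]
        constructor
        · intro hall s hs
          obtain ⟨k, hk, rfl⟩ := List.getElem_of_mem hs
          have := hall k (by omega) (by omega)
          rw [hgk k hk j hj, hg0, List.getD_eq_getElem _ _ hk] at this
          exact beq_iff_eq.mpr this
        · intro hall k hk _
          rw [hgk k (by omega) j hj, hg0]
          have hk' : k < seq.length := by omega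
          rw [List.getD_eq_getElem _ _ hk']
          exact beq_iff_eq.mp (hall _ (List.getElem_mem hk'))
      by_cases hall : ∀ k < trunc.length, 0 ≤ k →
          (trunc.getD k []).getD j ' ' = (trunc.getD 0 []).getD j ' '
      · rw [if_pos hall, if_pos (hiff.mp hall), hg0]
      · rw [if_neg hall, if_neg (fun h => hall (hiff.mpr h))]

-- ===== VERDICT (by name: the statement is the Claim_ definition above) =====
theorem find_mask_spec : Claim_equal_find_mask := by
  intro sequence mask _ hpre
  unfold Spec_find_mask
  exact find_mask_eq_alt sequence mask hpre
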